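-- pv_equiv track=rewrite | github.com/ZnCuT/- | migrate_data.py | parse_chapters_from_text
-- ===== SOURCE A (Python) =====
-- def parse_chapters_from_text(text):
--     """解析章节，同原来的逻辑"""
--     lines = text.splitlines()
--     chapters = []
--     cur_title = ''
--     cur_lines = []
--
--     for line in lines:
--         if line.startswith('## '):
--             # 保存前一章
--             if cur_lines or cur_title:
--                 chapters.append({
--                     'title': cur_title.strip(),
--                     'content': '\n'.join(cur_lines).strip()
--                 })
--             cur_title = line[3:].strip()
--             cur_lines = []
--         else:
--             cur_lines.append(line)
--
--     # 保存最后一章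
--     if cur_lines or cur_title:
--         chapters.append({
--             'title': cur_title.strip(),
--             'content': '\n'.join(cur_lines).strip()
--         })
--
--     if not chapters:
--         return [{'title': '', 'content': text.strip()}]
--
--     return chapters
-- ===== SOURCE B (Python) =====
-- def _split_at_marker(lines):
--     """Return (lines before the first '## ' marker, rest starting at that marker)."""
--     for j, l in enumerate(lines):
--         if l.startswith('## '):
--             return lines[:j], lines[j:]
--     return lines, []
--
--
-- def parse_chapters_from_text(text):
--     """解析章节，同原来的逻辑"""
--     pre, rest = _split_at_marker(text.splitlines())
--     segments = [('', pre)] if pre else []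
--     while rest:
--         head, tail = rest[0], rest[1:]
--         body, rest = _split_at_marker(tail)
--         title = head[3:].strip()
--         if title or body:
--             segments.append((title, body))
--     chapters = [{'title': t, 'content': '\n'.join(b).strip()} for t, b in segments]
--     return chapters if chapters else [{'title': '', 'content': text.strip()}]
-- ===== Notes on version B (the rewrite author's own statement) =====
-- stated objective: alternative
-- what changed: Replaces A's single-pass state machine (accumulating cur_title/cur_lines and flushing on each chapter-marker line) with a segment-splitting decomposition: a helper splits the line list at the next marker line, the preamble is emitted first, and a loop chops off one titled segment at a time by slicing up to the next marker.
import Mathlib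
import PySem

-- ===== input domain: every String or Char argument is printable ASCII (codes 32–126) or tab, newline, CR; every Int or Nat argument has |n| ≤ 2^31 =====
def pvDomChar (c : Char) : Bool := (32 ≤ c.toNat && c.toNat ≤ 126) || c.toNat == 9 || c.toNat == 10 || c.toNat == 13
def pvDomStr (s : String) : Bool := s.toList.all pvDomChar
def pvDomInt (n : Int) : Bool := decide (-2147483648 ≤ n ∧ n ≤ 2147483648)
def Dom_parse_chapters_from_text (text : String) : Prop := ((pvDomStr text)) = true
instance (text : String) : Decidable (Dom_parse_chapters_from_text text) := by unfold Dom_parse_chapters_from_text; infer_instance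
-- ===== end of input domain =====

-- B replaces A's flush-on-marker state machine by a split-at-next-marker segment decomposition (alternative; same cost).

-- ===== PORT A =====
def pvAStep (st : List (List (String × String)) × String × List String) (line : String) :
    List (List (String × String)) × String × List String :=
  let (chapters, cur_title, cur_lines) := st
  if PySem.Str.startswith line "## " then
    let chapters := if cur_lines ≠ [] ∨ cur_title ≠ "" then
        chapters ++ [[("title", PySem.Str.strip cur_title),
                      ("content", PySem.Str.strip (PySem.Str.join "\n" cur_lines))]]
      else chapters
    (chapters, PySem.Str.strip (PySem.Str.slice line (some 3) none), [])
  else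
    (chapters, cur_title, cur_lines ++ [line])

def parse_chapters_from_text (text : String) : List (List (String × String)) :=
  let lines := PySem.Str.splitlines text
  let st := lines.foldl pvAStep ([], "", [])
  let chapters :=
    if st.2.2 ≠ [] ∨ st.2.1 ≠ "" then
      st.1 ++ [[("title", PySem.Str.strip st.2.1),
                ("content", PySem.Str.strip (PySem.Str.join "\n" st.2.2))]]
    else st.1
  if chapters = [] then [[("title", ""), ("content", PySem.Str.strip text)]] else chapters

-- ===== PORT B =====
-- helper: the for-loop over enumerate(lines) returning (lines[:j], lines[j:]) at the first marker
def pvSplitAtMarker : List String → List String × List String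
  | [] => ([], [])
  | l :: ls =>
    if PySem.Str.startswith l "## " then ([], l :: ls)
    else
      ((pvSplitAtMarker ls).1.cons l, (pvSplitAtMarker ls).2)

theorem pvSplitAtMarker_snd_le (ls : List String) : (pvSplitAtMarker ls).2.length ≤ ls.length := by
  induction ls with
  | nil => simp [pvSplitAtMarker]
  | cons l ls ih =>
    simp only [pvSplitAtMarker]
    split
    · simp
    · simpa using Nat.le_succ_of_le ih

-- the while loop over `rest`: chop one titled segment, recurse on the remainder
def pvChop : List String → List (String × List String)
  | [] => []
  | head :: tail =>
    (if PySem.Str.strip (PySem.Str.slice head (some 3) none) ≠ "" ∨ (pvSplitAtMarker tail).1 ≠ []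
     then [(PySem.Str.strip (PySem.Str.slice head (some 3) none), (pvSplitAtMarker tail).1)]
     else []) ++ pvChop (pvSplitAtMarker tail).2
  termination_by rest => rest.length
  decreasing_by
    simpa using Nat.lt_succ_of_le (pvSplitAtMarker_snd_le tail)

def parse_chapters_from_text_alt (text : String) : List (List (String × String)) :=
  let lines := PySem.Str.splitlines text
  let pr := pvSplitAtMarker lines
  let segments := (if pr.1 ≠ [] then [(("" : String), pr.1)] else []) ++ pvChop pr.2
  let chapters := segments.map (fun tb =>
      [("title", tb.1), ("content", PySem.Str.strip (PySem.Str.join "\n" tb.2))])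
  if chapters = [] then [[("title", ""), ("content", PySem.Str.strip text)]] else chapters

-- ===== PRECONDITION & SPEC =====
def Spec_parse_chapters_from_text (text : String) (out : List (List (String × String))) : Prop := out = parse_chapters_from_text_alt text
instance (text : String) (out : List (List (String × String))) : Decidable (Spec_parse_chapters_from_text text out) := by unfold Spec_parse_chapters_from_text; infer_instance

-- ===== CLAIM (what is proved, stated in full; the proofs are below) =====
def Claim_equal_parse_chapters_from_text : Prop := ∀ (text : String), Dom_parse_chapters_from_text text → Spec_parse_chapters_from_text text (parse_chapters_from_text text)

-- ===== LEMMAS AND PROOFS =====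

-- A-style rendering of one chapter and A's conditional emission
def pvRenderA (t : String) (b : List String) : List (String × String) :=
  [("title", PySem.Str.strip t), ("content", PySem.Str.strip (PySem.Str.join "\n" b))]

def pvEmit (t : String) (b : List String) : List (List (String × String)) :=
  if b ≠ [] ∨ t ≠ "" then [pvRenderA t b] else []

def pvFinal (st : List (List (String × String)) × String × List String) :
    List (List (String × String)) :=
  st.1 ++ pvEmit st.2.1 st.2.2

-- B-style rendering (no re-strip of the title)
def pvRenderB (tb : String × List String) : List (String × String) :=
  [("title", tb.1), ("content", PySem.Str.strip (PySem.Str.join "\n" tb.2))]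

theorem pvFinal_eq (st : List (List (String × String)) × String × List String) :
    (if st.2.2 ≠ [] ∨ st.2.1 ≠ "" then
       st.1 ++ [[("title", PySem.Str.strip st.2.1),
                 ("content", PySem.Str.strip (PySem.Str.join "\n" st.2.2))]]
     else st.1) = pvFinal st := by
  unfold pvFinal pvEmit pvRenderA
  split <;> simp

theorem pvChop_cons (head : String) (tail : List String) :
    pvChop (head :: tail)
    = (if PySem.Str.strip (PySem.Str.slice head (some 3) none) ≠ "" ∨ (pvSplitAtMarker tail).1 ≠ []
       then [(PySem.Str.strip (PySem.Str.slice head (some 3) none), (pvSplitAtMarker tail).1)]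
       else []) ++ pvChop (pvSplitAtMarker tail).2 := by
  rw [pvChop]

-- dropWhile is idempotent
theorem pvDropWhile_idem {α : Type} (p : α → Bool) (xs : List α) :
    List.dropWhile p (List.dropWhile p xs) = List.dropWhile p xs := by
  induction xs with
  | nil => simp
  | cons a t ih =>
    by_cases h : p a = true
    · simp [h, ih]
    · simp [h]

-- a fixed point of dropWhile stays fixed on its prefixes
theorem pvDropWhile_prefix_inv {α : Type} (p : α → Bool) {xs r : List α}
    (hfix : List.dropWhile p xs = xs) (hpre : r <+: xs) :
    List.dropWhile p r = r := by
  cases r with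
  | nil => simp
  | cons a r' =>
    obtain ⟨t, ht⟩ := hpre
    have hx : xs = a :: (r' ++ t) := by simpa using ht.symm
    subst hx
    by_cases h : p a = true
    · exfalso
      have h1 : List.dropWhile p (a :: (r' ++ t)) = List.dropWhile p (r' ++ t) := by
        simp [h]
      rw [h1] at hfix
      have h2 : (List.dropWhile p (r' ++ t)).length ≤ (r' ++ t).length :=
        (List.dropWhile_sublist _).length_le
      rw [hfix] at h2
      simp at h2
    · simp [h]

theorem pvCharsStrip_idem (cs : List Char) :
    PySem.Chars.strip (PySem.Chars.strip cs) = PySem.Chars.strip cs := by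
  unfold PySem.Chars.strip PySem.Chars.lstrip PySem.Chars.rstrip
  set p := PySem.Chars.isspace
  set y := List.dropWhile p cs with hy
  have hfix : List.dropWhile p y = y := pvDropWhile_idem p cs
  have hpre : (List.dropWhile p y.reverse).reverse <+: y := by
    have hsuf : List.dropWhile p y.reverse <:+ y.reverse := List.dropWhile_suffix p
    have := List.reverse_prefix.mpr hsuf
    simpa using this
  have h1 : List.dropWhile p (List.dropWhile p y.reverse).reverse
      = (List.dropWhile p y.reverse).reverse := pvDropWhile_prefix_inv p hfix hpre
  rw [h1]
  simp [pvDropWhile_idem]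

theorem pvStrip_idem (s : String) :
    PySem.Str.strip (PySem.Str.strip s) = PySem.Str.strip s := by
  simp [PySem.Str.strip, pvCharsStrip_idem]

theorem pvEmit_eq_renderB (tt : String) (bb : List String)
    (h : PySem.Str.strip tt = tt) :
    pvEmit tt bb
    = (if tt ≠ "" ∨ bb ≠ [] then [(tt, bb)] else []).map pvRenderB := by
  have h0 : PySem.Str.strip "" = "" := rfl
  unfold pvEmit pvRenderB pvRenderA
  by_cases h1 : bb = [] <;> by_cases h2 : tt = "" <;> simp [h1, h2, h, h0]

theorem pvAStep_marker (ch : List (List (String × String))) (t : String) (b : List String)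
    (l : String) (hm : PySem.Str.startswith l "## " = true) :
    pvAStep (ch, t, b) l
    = (ch ++ pvEmit t b, PySem.Str.strip (PySem.Str.slice l (some 3) none), []) := by
  simp only [pvAStep, hm, if_true]
  unfold pvEmit pvRenderA
  split <;> simp

theorem pvAStep_plain (ch : List (List (String × String))) (t : String) (b : List String)
    (l : String) (hm : ¬ PySem.Str.startswith l "## " = true) :
    pvAStep (ch, t, b) l = (ch, t, b ++ [l]) := by
  simp only [pvAStep]
  rw [if_neg hm]

-- The core invariant of A's loop: folding pvAStep and flushing the pending block
-- equals the emitted chapters so far, the pending block extended by the lines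
-- before the next marker, and B's chop of the remainder.
theorem pvFold_core (lines : List String) :
    ∀ (ch : List (List (String × String))) (t : String) (b : List String),
      pvFinal (lines.foldl pvAStep (ch, t, b))
      = ch ++ pvEmit t (b ++ (pvSplitAtMarker lines).1)
           ++ (pvChop (pvSplitAtMarker lines).2).map pvRenderB := by
  induction lines with
  | nil =>
    intro ch t b
    simp [pvSplitAtMarker, pvChop, pvFinal]
  | cons l ls ih =>
    intro ch t b
    by_cases hm : PySem.Str.startswith l "## " = true
    · have hmc : PySem.Chars.startswith l.toList ['#', '#', ' '] = true := by
        simpa [PySem.Str.startswith] using hm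
      have hsplit : pvSplitAtMarker (l :: ls) = ([], l :: ls) := by
        simp [pvSplitAtMarker, hmc]
      rw [List.foldl_cons, pvAStep_marker ch t b l hm,
          ih (ch ++ pvEmit t b) (PySem.Str.strip (PySem.Str.slice l (some 3) none)) [],
          hsplit, pvChop_cons, List.map_append,
          pvEmit_eq_renderB _ _ (pvStrip_idem _)]
      simp
    · have hmc : PySem.Chars.startswith l.toList ['#', '#', ' '] = false := by
        simpa [PySem.Str.startswith] using hm
      have hsplit : pvSplitAtMarker (l :: ls)
          = ((pvSplitAtMarker ls).1.cons l, (pvSplitAtMarker ls).2) := by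
        simp [pvSplitAtMarker, hmc]
      rw [List.foldl_cons, pvAStep_plain ch t b l hm, ih ch t (b ++ [l]), hsplit]
      simp

-- ===== VERDICT (by name: the statement is the Claim_ definition above) =====
theorem parse_chapters_from_text_spec : Claim_equal_parse_chapters_from_text := by
  intro text _
  unfold Spec_parse_chapters_from_text parse_chapters_from_text parse_chapters_from_text_alt
  simp only [pvFinal_eq]
  rw [pvFold_core (PySem.Str.splitlines text) [] "" []]
  have hpre : pvEmit "" ([] ++ (pvSplitAtMarker (PySem.Str.splitlines text)).1)
      = (if (pvSplitAtMarker (PySem.Str.splitlines text)).1 ≠ []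
         then [(("" : String), (pvSplitAtMarker (PySem.Str.splitlines text)).1)]
         else []).map pvRenderB := by
    rw [List.nil_append, pvEmit_eq_renderB _ _ (by rfl)]
    by_cases h : (pvSplitAtMarker (PySem.Str.splitlines text)).1 = [] <;> simp [h]
  rw [hpre]
  simp only [List.nil_append, ← List.map_append]
  rfl
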